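-- pv_equiv track=rewrite | github.com/noviceprogrammer/pysc2-protossbot | protoss/QLearningLib.py | get_scaled_value
-- ===== SOURCE A (Python) =====
-- scales = [[1,2,4,8,16], #Zealot
--           [2,4,8,16,32], #Stalker
--           [0,1,2,4,8], #Immortal
--           [0,1,2,4,8], #Sentury
--           [2700,5400,8100,13500,27000]] #Time
--
-- def get_scaled_value(typ, n_zealot=0, n_stalker=0, n_immortal=0, n_sentury= 0, time=0):
--     if typ == 'SIMPLE':
--         numbers = [n_zealot, n_stalker, n_immortal, n_sentury, time]
--         outs = [0,0,0,0,0]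
--         for i in range(len(numbers)):
--             for j in range(len(scales[i])):
--
--                 if scales[i][j] >= numbers[i]:
--
--                     outs[i] = j + 1
--                     break
--             if(outs[i] == 0):
--                 outs[i] = 5
--         state = 10000*outs[0] + 1000*outs[1] + 100*outs[2] + 10*outs[3] + outs[4]
--         return state
-- ===== SOURCE B (Python) =====
-- scales = [[1,2,4,8,16], #Zealot
--           [2,4,8,16,32], #Stalker
--           [0,1,2,4,8], #Immortal
--           [0,1,2,4,8], #Sentury
--           [2700,5400,8100,13500,27000]] #Time
--
-- def get_scaled_value(typ, n_zealot=0, n_stalker=0, n_immortal=0, n_sentury=0, time=0):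
--     if typ != 'SIMPLE':
--         return None
--     state = 0
--     for row, v in zip(scales, [n_zealot, n_stalker, n_immortal, n_sentury, time]):
--         # binary search (bisect_left): first index whose threshold is >= v
--         lo, hi = 0, len(row)
--         while lo < hi:
--             mid = (lo + hi) // 2
--             if row[mid] < v:
--                 lo = mid + 1
--             else:
--                 hi = mid
--         state = state * 10 + min(lo + 1, 5)
--     return state
-- ===== Notes on version B (the rewrite author's own statement) =====
-- stated objective: alternative
-- what changed: Replaces A's linear break-scan per threshold row plus the outs-array 0-to-5 patch-up with a hand-rolled binary search (bisect_left: first index with threshold >= value, capped at 5) and folds the five digits into the state base-10 instead of hard-coded positional weights.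
import Mathlib
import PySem

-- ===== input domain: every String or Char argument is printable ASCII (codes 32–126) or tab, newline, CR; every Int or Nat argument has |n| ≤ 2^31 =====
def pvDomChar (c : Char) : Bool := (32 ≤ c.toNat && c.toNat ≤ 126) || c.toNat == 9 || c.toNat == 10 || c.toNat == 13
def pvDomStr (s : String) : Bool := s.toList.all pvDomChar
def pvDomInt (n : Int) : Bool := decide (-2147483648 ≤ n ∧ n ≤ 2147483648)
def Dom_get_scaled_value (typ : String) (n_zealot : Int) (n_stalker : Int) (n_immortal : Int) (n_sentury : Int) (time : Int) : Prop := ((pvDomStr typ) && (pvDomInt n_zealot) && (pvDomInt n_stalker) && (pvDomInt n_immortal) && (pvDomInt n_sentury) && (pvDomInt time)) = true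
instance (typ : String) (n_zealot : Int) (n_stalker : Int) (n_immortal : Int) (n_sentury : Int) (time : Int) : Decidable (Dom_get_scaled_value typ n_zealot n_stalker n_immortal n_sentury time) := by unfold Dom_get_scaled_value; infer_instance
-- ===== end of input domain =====

-- B replaces A's linear break-scan per row and the outs-array 0→5 patch-up with a
-- binary search (bisect_left, capped at 5) and a base-10 fold of the digits (alternative, same cost).

-- ===== PORT A =====
def scalesA : List (List Int) :=
  [[1,2,4,8,16], [2,4,8,16,32], [0,1,2,4,8], [0,1,2,4,8], [2700,5400,8100,13500,27000]]

-- inner 'for j … break' loop of A: first j (1-based) with scales[i][j] ≥ v, else 0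
def scanA : List Int → Int → Int → Int
  | [], _, _ => 0
  | t :: rest, v, j => if t ≥ v then j + 1 else scanA rest v (j + 1)

def get_scaled_value (typ : String) (n_zealot : Int) (n_stalker : Int) (n_immortal : Int) (n_sentury : Int) (time : Int) : Option Int :=
  if typ == "SIMPLE" then
    let numbers : List Int := [n_zealot, n_stalker, n_immortal, n_sentury, time]
    let outs : List Int := (List.range 5).map (fun i =>
      let o := scanA (scalesA.getD i []) (numbers.getD i 0) 0
      if o = 0 then 5 else o)
    some (10000 * outs.getD 0 0 + 1000 * outs.getD 1 0 + 100 * outs.getD 2 0 +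
          10 * outs.getD 3 0 + outs.getD 4 0)
  else none

-- ===== PORT B =====
def scalesB : List (List Int) :=
  [[1,2,4,8,16], [2,4,8,16,32], [0,1,2,4,8], [0,1,2,4,8], [2700,5400,8100,13500,27000]]

-- hand-rolled bisect_left over row on indices [lo, hi)
def bsearchB (row : List Int) (v : Int) (lo hi : Nat) : Nat :=
  if _h : lo < hi then
    let mid := (lo + hi) / 2
    if row.getD mid 0 < v then bsearchB row v (mid + 1) hi
    else bsearchB row v lo mid
  else lo
termination_by hi - lo
decreasing_by all_goals omega

def get_scaled_value_alt (typ : String) (n_zealot : Int) (n_stalker : Int) (n_immortal : Int) (n_sentury : Int) (time : Int) : Option Int :=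
  if typ != "SIMPLE" then none
  else
    some ((scalesB.zip [n_zealot, n_stalker, n_immortal, n_sentury, time]).foldl
      (fun st p => st * 10 + ((min (bsearchB p.1 p.2 0 p.1.length + 1) 5 : Nat) : Int)) 0)

-- ===== PRECONDITION & SPEC =====
def Spec_get_scaled_value (typ : String) (n_zealot : Int) (n_stalker : Int) (n_immortal : Int) (n_sentury : Int) (time : Int) (out : Option Int) : Prop := out = get_scaled_value_alt typ n_zealot n_stalker n_immortal n_sentury time
instance (typ : String) (n_zealot : Int) (n_stalker : Int) (n_immortal : Int) (n_sentury : Int) (time : Int) (out : Option Int) : Decidable (Spec_get_scaled_value typ n_zealot n_stalker n_immortal n_sentury time out) := by unfold Spec_get_scaled_value; infer_instance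

-- ===== CLAIM (what is proved, stated in full; the proofs are below) =====
def Claim_equal_get_scaled_value : Prop := ∀ (typ : String) (n_zealot : Int) (n_stalker : Int) (n_immortal : Int) (n_sentury : Int) (time : Int), Dom_get_scaled_value typ n_zealot n_stalker n_immortal n_sentury time → Spec_get_scaled_value typ n_zealot n_stalker n_immortal n_sentury time (get_scaled_value typ n_zealot n_stalker n_immortal n_sentury time)

-- ===== LEMMAS AND PROOFS =====
-- closed form of the 5-element binary search, by full unfolding
theorem bs5 (a b c d e v : Int) :
    bsearchB [a,b,c,d,e] v 0 5 =
      if c < v then (if e < v then 5 else if d < v then 4 else 3)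
      else (if b < v then 2 else if a < v then 1 else 0) := by
  unfold bsearchB
  unfold bsearchB
  unfold bsearchB
  unfold bsearchB
  norm_num [List.getD]

theorem digit_eq (row : List Int) (v : Int) (hrow : row ∈ scalesA) :
    (if scanA row v 0 = 0 then 5 else scanA row v 0)
      = ((min (bsearchB row v 0 row.length + 1) 5 : Nat) : Int) := by
  fin_cases hrow <;>
    simp only [scanA, List.length_cons, List.length_nil, ge_iff_le] <;>
    rw [show (4:Nat)+1 = 5 from rfl, bs5] <;>
    split_ifs <;> norm_num <;> omega

theorem get_scaled_value_spec : Claim_equal_get_scaled_value := by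
  intro typ nz ns ni nse t _
  unfold Spec_get_scaled_value get_scaled_value get_scaled_value_alt
  by_cases h : typ = "SIMPLE"
  · subst h
    simp only [beq_self_eq_true, if_true, bne_self_eq_false, Bool.false_eq_true, if_false]
    have h0 := digit_eq [1,2,4,8,16] nz (by simp [scalesA])
    have h1 := digit_eq [2,4,8,16,32] ns (by simp [scalesA])
    have h2 := digit_eq [0,1,2,4,8] ni (by simp [scalesA])
    have h3 := digit_eq [0,1,2,4,8] nse (by simp [scalesA])
    have h4 := digit_eq [2700,5400,8100,13500,27000] t (by simp [scalesA])
    simp only [scalesA, scalesB, show List.range 5 = [0,1,2,3,4] from rfl,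
      List.map_cons, List.map_nil, List.getD, List.getElem?_cons_zero,
      List.getElem?_cons_succ, Option.getD_some,
      List.zip_cons_cons, List.zip_nil_right,
      List.foldl_cons, List.foldl_nil]
    rw [← h0, ← h1, ← h2, ← h3, ← h4]
    congr 1
    ring
  · simp [h]
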